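-- pv_equiv track=rewrite | github.com/nalsakas/first_unique_element | main.py | findFirstUniqueElement
-- ===== SOURCE A (Python) =====
-- def findFirstUniqueElement(arr):
--     i = 0
--     j = 0
--     while i < len(arr):
--         i = j
--         j = i + 1
--         while j < len(arr) and arr[j] == arr[i]:
--             j += 1
--         length = j - i
--
--         if length == 1: break
--
--     # return current i
--     if i == len(arr):
--         return None
--
--     return arr[i]
-- ===== SOURCE B (Python) =====
-- def findFirstUniqueElement(arr):
--     n = len(arr)
--     for k in range(n):
--         if (k == 0 or arr[k] != arr[k-1]) and (k == n-1 or arr[k] != arr[k+1]):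
--             return arr[k]
--     return None
-- ===== Notes on version B (the rewrite author's own statement) =====
-- stated objective: simpler
-- what changed: Replaced the two-pointer run-scanning nested while loops (run-length counter, pointer jumping) by a single flat scan returning the first index whose left and right neighbors both differ.
import Mathlib
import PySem

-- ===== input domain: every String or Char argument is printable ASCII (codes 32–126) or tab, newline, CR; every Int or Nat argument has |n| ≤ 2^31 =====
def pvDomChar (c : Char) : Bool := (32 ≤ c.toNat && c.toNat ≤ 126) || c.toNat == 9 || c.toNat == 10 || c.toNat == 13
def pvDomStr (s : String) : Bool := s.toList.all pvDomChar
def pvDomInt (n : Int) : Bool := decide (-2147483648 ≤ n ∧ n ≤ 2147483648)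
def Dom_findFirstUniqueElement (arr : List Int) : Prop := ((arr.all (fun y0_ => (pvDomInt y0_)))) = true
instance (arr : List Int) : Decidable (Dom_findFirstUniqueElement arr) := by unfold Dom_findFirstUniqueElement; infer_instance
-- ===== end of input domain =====

-- B drops A's two-pointer run-scanning nested loops for one flat "both neighbors differ" scan (objective: simpler).

-- ===== PORT A =====
-- inner while: advance j while j < len(arr) and arr[j] == x  (x = arr[i], constant over the loop)
def pvInnerA (arr : List Int) (x : Int) (j : Nat) : Nat :=
  if j < arr.length ∧ arr.getD j 0 = x then pvInnerA arr x (j + 1) else j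
termination_by arr.length - j
decreasing_by omega

-- outer while; fuel (arr.length + 1) only makes the recursion total, it is never exhausted
def pvOuterA (arr : List Int) : Nat → Nat → Nat → Nat × Nat
  | 0, i, j => (i, j)
  | f + 1, i, j =>
    if i < arr.length then
      let i' := j
      let j' := pvInnerA arr (arr.getD i' 0) (i' + 1)
      if j' - i' = 1 then (i', j')
      else pvOuterA arr f i' j'
    else (i, j)

def findFirstUniqueElement (arr : List Int) : Option Int :=
  let p := pvOuterA arr (arr.length + 1) 0 0
  if p.1 = arr.length then none else some (arr.getD p.1 0)

-- ===== PORT B =====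
-- (k == 0 or arr[k] != arr[k-1]) and (k == n-1 or arr[k] != arr[k+1])
def pvUniqAt (arr : List Int) (k : Nat) : Bool :=
  (k == 0 || arr.getD k 0 != arr.getD (k - 1) 0) &&
  (k == arr.length - 1 || arr.getD k 0 != arr.getD (k + 1) 0)

-- the for-k-in-range(n) loop with its early return
def pvAltLoop (arr : List Int) (k : Nat) : Option Int :=
  if k < arr.length then
    if pvUniqAt arr k then some (arr.getD k 0) else pvAltLoop arr (k + 1)
  else none
termination_by arr.length - k
decreasing_by omega

def findFirstUniqueElement_alt (arr : List Int) : Option Int := pvAltLoop arr 0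

-- ===== PRECONDITION & SPEC =====
def Spec_findFirstUniqueElement (arr : List Int) (out : Option Int) : Prop := out = findFirstUniqueElement_alt arr
instance (arr : List Int) (out : Option Int) : Decidable (Spec_findFirstUniqueElement arr out) := by unfold Spec_findFirstUniqueElement; infer_instance

-- ===== CLAIM (what is proved, stated in full; the proofs are below) =====
def Claim_equal_findFirstUniqueElement : Prop := ∀ (arr : List Int), Dom_findFirstUniqueElement arr → Spec_findFirstUniqueElement arr (findFirstUniqueElement arr)

-- ===== LEMMAS AND PROOFS =====

-- the inner while loop stops at the end of the run of x starting at j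
theorem pvInnerA_spec (arr : List Int) (x : Int) (j : Nat) (hj : j ≤ arr.length) :
    j ≤ pvInnerA arr x j ∧ pvInnerA arr x j ≤ arr.length ∧
    (∀ m, j ≤ m → m < pvInnerA arr x j → arr.getD m 0 = x) ∧
    (pvInnerA arr x j = arr.length ∨ arr.getD (pvInnerA arr x j) 0 ≠ x) := by
  fun_induction pvInnerA arr x j with
  | case1 j h ih =>
    rcases ih (by omega) with ⟨h1, h2, h3, h4⟩
    refine ⟨by omega, h2, ?_, h4⟩
    intro m hm1 hm2
    rcases Nat.eq_or_lt_of_le hm1 with rfl | hlt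
    · exact h.2
    · exact h3 m (by omega) hm2
  | case2 j h =>
    push Not at h
    refine ⟨le_refl _, hj, fun m hm1 hm2 => by omega, ?_⟩
    rcases Nat.lt_or_ge j arr.length with hlt | hge
    · exact Or.inr (h hlt)
    · exact Or.inl (by omega)

-- skipping non-unique indices does not change B's result
theorem pvAltLoop_skip (arr : List Int) (k : Nat) (hk : k ≤ arr.length)
    (h : ∀ m, m < k → pvUniqAt arr m = false) :
    pvAltLoop arr 0 = pvAltLoop arr k := by
  induction k with
  | zero => rfl
  | succ k ih =>
    rw [ih (by omega) (fun m hm => h m (by omega))]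
    rw [pvAltLoop]
    simp [Nat.lt_of_succ_le hk, h k (by omega)]

theorem pvAltLoop_end (arr : List Int) : pvAltLoop arr arr.length = none := by
  rw [pvAltLoop]; simp

-- main invariant for A's outer loop:
-- i < n, j ≤ n, j starts a run (or j = n), no index below j is unique, and fuel covers n - j.
theorem pvOuterA_main (arr : List Int) (f : Nat) : ∀ i j, arr.length - j < f → j ≤ arr.length →
    i < arr.length →
    (j = arr.length ∨ j = 0 ∨ arr.getD j 0 ≠ arr.getD (j - 1) 0) →
    (∀ m, m < j → pvUniqAt arr m = false) →
    (if (pvOuterA arr f i j).1 = arr.length then none else some (arr.getD (pvOuterA arr f i j).1 0))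
      = pvAltLoop arr 0 := by
  induction f with
  | zero => intro i j hf; omega
  | succ f ih =>
    intro i j hf hj hi hstart hnone
    rw [pvOuterA]
    simp only [hi, if_pos]
    rcases Nat.eq_or_lt_of_le hj with rfl | hjlt
    · -- j = arr.length: inner loop is skipped (j+1 not < length), run "length" is 1, break, return None
      have hinner : pvInnerA arr (arr.getD arr.length 0) (arr.length + 1) = arr.length + 1 := by
        rw [pvInnerA]; simp
      simp only [hinner]
      have h1 : arr.length + 1 - arr.length = 1 := by omega
      rw [h1, if_pos rfl]
      have hB : pvAltLoop arr 0 = none := by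
        rw [pvAltLoop_skip arr arr.length (le_refl _) hnone, pvAltLoop_end]
      rw [hB]; simp
    · -- j < arr.length : scan the run starting at j
      obtain ⟨h1, h2, h3, h4⟩ := pvInnerA_spec arr (arr.getD j 0) (j + 1) (by omega)
      set j' := pvInnerA arr (arr.getD j 0) (j + 1) with hj'
      by_cases hlen : j' - j = 1
      · -- run of length 1: A returns arr[j]; B also finds j first
        have hj'' : j' = j + 1 := by omega
        rw [if_pos hlen]
        simp only [if_neg (by omega : ¬ j = arr.length)]
        have huniq : pvUniqAt arr j = true := by
          simp only [pvUniqAt, Bool.and_eq_true, Bool.or_eq_true, beq_iff_eq, bne_iff_ne, ne_eq]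
          constructor
          · rcases hstart with h | h | h
            · omega
            · exact Or.inl h
            · exact Or.inr h
          · rcases h4 with h4 | h4
            · exact Or.inl (by omega)
            · rw [hj''] at h4
              exact Or.inr (fun e => h4 e.symm)
        rw [pvAltLoop_skip arr j (by omega) hnone, pvAltLoop]
        simp [hjlt, huniq]
      · -- run of length ≥ 2: every index in [j, j') is non-unique; recurse at j'
        have hge2 : j + 2 ≤ j' := by omega
        have hxj1 : arr.getD (j + 1) 0 = arr.getD j 0 := h3 (j + 1) (le_refl _) (by omega)
        have hnone' : ∀ m, m < j' → pvUniqAt arr m = false := by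
          intro m hm
          rcases Nat.lt_or_ge m j with hmj | hmj
          · exact hnone m hmj
          rw [Bool.eq_false_iff]
          simp only [pvUniqAt, ne_eq, Bool.and_eq_true, Bool.or_eq_true, beq_iff_eq, bne_iff_ne]
          rintro ⟨hl, hr⟩
          rcases Nat.eq_or_lt_of_le hmj with heq | hmlt
          · -- m = j : right neighbor exists and is equal
            subst heq
            rcases hr with hr | hr
            · omega
            · exact hr hxj1.symm
          · -- j < m < j' : left neighbor equal
            have hml : arr.getD (m - 1) 0 = arr.getD j 0 := by
              rcases Nat.eq_or_lt_of_le (by omega : j + 1 ≤ m) with h' | h'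
              · rw [← h']; simp
              · exact h3 (m - 1) (by omega) (by omega)
            have hmv : arr.getD m 0 = arr.getD j 0 := h3 m (by omega) hm
            rcases hl with hl | hl
            · omega
            · exact hl (hmv.trans hml.symm)
        have hstart' : j' = arr.length ∨ j' = 0 ∨ arr.getD j' 0 ≠ arr.getD (j' - 1) 0 := by
          rcases h4 with h4 | h4
          · exact Or.inl h4
          · refine Or.inr (Or.inr ?_)
            have hv : arr.getD (j' - 1) 0 = arr.getD j 0 := h3 (j' - 1) (by omega) (by omega)
            rw [hv]; exact h4
        rw [if_neg hlen]
        exact ih j j' (by omega) h2 hjlt hstart' hnone'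

-- ===== VERDICT (by name: the statement is the Claim_ definition above) =====
theorem findFirstUniqueElement_spec : Claim_equal_findFirstUniqueElement := by
  intro arr _
  unfold Spec_findFirstUniqueElement findFirstUniqueElement findFirstUniqueElement_alt
  rcases Nat.eq_zero_or_pos arr.length with h0 | hpos
  · rw [pvOuterA]
    simp [h0, pvAltLoop]
  · exact pvOuterA_main arr (arr.length + 1) 0 0 (by omega) (by omega) hpos
      (Or.inr (Or.inl rfl)) (fun m hm => by omega)
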